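-- pv_equiv track=rewrite | github.com/inudev3/Algo-study | BOJ/2138.py | go
-- ===== SOURCE A (Python) =====
-- from collections import namedtuple
--
-- switch = namedtuple('switch', ['success', 'count'])
--
-- def change(a, index):
--     n = len(a);
--     for i in range(index-1, index+2):
--         if 0<=i<n:
--             a[i] = 1-a[i]
--
-- def go(a, goal):
--     n = len(a)
--     ans =0
--     for i in range(n-1):
--         if a[i]!= goal[i]:
--             change(a, i+1)
--             ans+=1
--     ok = True
--     for i in range(n):
--         if a[i]!= goal[i]:
--             ok = False
--     if ok:
--         return switch(True, ans)
--     else: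
--         return switch(False, ans)
-- ===== SOURCE B (Python) =====
-- from collections import namedtuple
--
-- switch = namedtuple('switch', ['success', 'count'])
--
-- # Single pass, no mutation: carry the flip parity of the two pending window
-- # flips (p1 = flip at i-1, p2 = flip at i-2) and fold the success check into
-- # the same loop.  (Return value only: A mutates `a` in place, B does not.)
-- def go(a, goal):
--     n = len(a)
--     ans = 0
--     ok = True
--     p1 = p2 = False
--     for i in range(n):
--         eff = 1 - a[i] if p1 != p2 else a[i]
--         if i == n - 1:
--             ok = ok and eff == goal[i]
--             p2, p1 = p1, False
--         elif eff != goal[i]: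
--             ans += 1
--             ok = ok and 1 - eff == goal[i]
--             p2, p1 = p1, True
--         else:
--             p2, p1 = p1, False
--     return switch(ok, ans)
-- ===== Notes on version B (the rewrite author's own statement) =====
-- stated objective: alternative
-- what changed: A greedily mutates the list with an in-place triple flip at each mismatch and then re-scans the whole list to verify; B makes one mutation-free pass carrying the flip parity of the two pending window flips, folding count and success check into the same loop.
import Mathlib
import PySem

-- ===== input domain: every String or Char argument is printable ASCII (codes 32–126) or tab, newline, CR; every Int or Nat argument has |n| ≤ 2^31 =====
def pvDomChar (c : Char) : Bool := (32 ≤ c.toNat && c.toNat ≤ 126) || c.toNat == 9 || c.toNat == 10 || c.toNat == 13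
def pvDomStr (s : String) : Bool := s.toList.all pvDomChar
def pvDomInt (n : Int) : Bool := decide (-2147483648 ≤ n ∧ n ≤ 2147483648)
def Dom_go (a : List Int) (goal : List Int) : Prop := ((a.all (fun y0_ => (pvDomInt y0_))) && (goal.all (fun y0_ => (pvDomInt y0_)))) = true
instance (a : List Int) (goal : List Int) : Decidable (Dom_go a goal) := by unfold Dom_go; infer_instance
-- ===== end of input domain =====

-- B replaces A's in-place triple-flip mutation (plus a second verification pass) with a
-- single mutation-free pass carrying the flip parity of the two pending window flips.
-- Equivalence is about the RETURN value only: Python A mutates `a` in place, Python B does not.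

-- ===== PORT A =====
def change (a : List Int) (index : Int) : List Int :=
  let n : Int := a.length
  (PySem.List.pyRange (index - 1) (index + 2) 1).foldl
    (fun l i =>
      if 0 ≤ i ∧ i < n then PySem.List.pySetD l i (1 - PySem.List.pyGetD l i 0) else l) a

def go (a : List Int) (goal : List Int) : Bool × Int :=
  let n := a.length
  let st := (PySem.List.pyRange 0 ((n : Int) - 1) 1).foldl
    (fun (st : List Int × Int) i =>
      if PySem.List.pyGetD st.1 i 0 ≠ PySem.List.pyGetD goal i 0 then
        (change st.1 (i + 1), st.2 + 1)
      else st) (a, 0)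
  let ok := (PySem.List.pyRange 0 (n : Int) 1).foldl
    (fun ok i => if PySem.List.pyGetD st.1 i 0 ≠ PySem.List.pyGetD goal i 0 then false else ok)
    true
  if ok then (true, st.2) else (false, st.2)

-- ===== PORT B =====
def go_alt (a : List Int) (goal : List Int) : Bool × Int :=
  let n := a.length
  let st := (PySem.List.pyRange 0 (n : Int) 1).foldl
    (fun (st : Int × Bool × Bool × Bool) i =>
      let eff := if st.2.2.1 != st.2.2.2 then 1 - PySem.List.pyGetD a i 0
                 else PySem.List.pyGetD a i 0
      if i = (n : Int) - 1 then
        (st.1, st.2.1 && decide (eff = PySem.List.pyGetD goal i 0), false, st.2.2.1)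
      else if eff ≠ PySem.List.pyGetD goal i 0 then
        (st.1 + 1, st.2.1 && decide (1 - eff = PySem.List.pyGetD goal i 0), true, st.2.2.1)
      else (st.1, st.2.1, false, st.2.2.1))
    (0, true, false, false)
  (st.2.1, st.1)

-- ===== PRECONDITION & SPEC =====
-- Pre_: Python A reads goal[i] for every i < len(a), so it raises IndexError whenever goal
-- is shorter than a; exactly those inputs are excluded.
def Pre_go (a : List Int) (goal : List Int) : Prop := a.length ≤ goal.length
instance (a : List Int) (goal : List Int) : Decidable (Pre_go a goal) := by unfold Pre_go; infer_instance
def pvWitness_go : List Int × List Int := ([1, 0, 0], [0, 0, 1])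

def Spec_go (a : List Int) (goal : List Int) (out : Bool × Int) : Prop := out = go_alt a goal
instance (a : List Int) (goal : List Int) (out : Bool × Int) : Decidable (Spec_go a goal out) := by unfold Spec_go; infer_instance

-- ===== CLAIM (what is proved, stated in full; the proofs are below) =====
def Claim_equal_go : Prop := ∀ (a : List Int) (goal : List Int), Dom_go a goal → Pre_go a goal → Spec_go a goal (go a goal)

-- ===== LEMMAS AND PROOFS =====

lemma getD_set (l : List Int) (i j : Nat) (v : Int) :
    (l.set i v).getD j 0 = if j = i ∧ i < l.length then v else l.getD j 0 := by
  simp [List.getD_eq_getElem?_getD, List.getElem?_set]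
  split_ifs with h1 h2 h3 <;> simp_all

lemma set_oob (l : List Int) (i : Nat) (v : Int) (h : l.length ≤ i) : l.set i v = l :=
  List.set_eq_of_length_le h

-- `change l (s+1)` is the three flips at s, s+1, s+2 (an out-of-range set is a no-op).
lemma change_eq (l : List Int) (s : Nat) :
    change l ((s : Int) + 1) =
      ((l.set s (1 - l.getD s 0)).set (s + 1) (1 - l.getD (s + 1) 0)).set (s + 2)
        (1 - l.getD (s + 2) 0) := by
  unfold change
  have h1 : (PySem.List.pyRange ((s:Int) + 1 - 1) ((s:Int) + 1 + 2) 1)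
      = [((s : Nat) : Int), (((s + 1 : Nat)) : Int), (((s + 2 : Nat)) : Int)] := by
    rw [PySem.List.pyRange_one_cons (by omega), PySem.List.pyRange_one_cons (by omega),
        PySem.List.pyRange_one_cons (by omega), PySem.List.pyRange_one_eq_nil (by omega)]
    push_cast; norm_num; omega
  have e0 : (0 ≤ ((s:Nat):Int) ∧ ((s:Nat):Int) < ((l.length : Nat):Int)) ↔ s < l.length := by omega
  have e1 : (0 ≤ (((s+1:Nat)):Int) ∧ (((s+1:Nat)):Int) < ((l.length : Nat):Int)) ↔ s + 1 < l.length := by omega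
  have e2 : (0 ≤ (((s+2:Nat)):Int) ∧ (((s+2:Nat)):Int) < ((l.length : Nat):Int)) ↔ s + 2 < l.length := by omega
  rw [h1]
  simp only [List.foldl_cons, List.foldl_nil, PySem.List.pySetD_natCast,
    PySem.List.pyGetD_natCast, e0, e1, e2]
  by_cases h0 : s < l.length <;> by_cases hb1 : s + 1 < l.length <;>
    by_cases hb2 : s + 2 < l.length <;>
    simp only [h0, hb1, hb2, if_true, if_false] <;>
    try (exfalso; omega)
  · simp
  · rw [set_oob ((l.set s (1 - l.getD s 0)).set (s+1) (1 - l.getD (s+1) 0)) (s+2)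
        (1 - l.getD (s+2) 0) (by simp; omega)]
    simp
  · rw [set_oob ((l.set s (1 - l.getD s 0)).set (s+1) (1 - l.getD (s+1) 0)) (s+2)
        (1 - l.getD (s+2) 0) (by simp; omega),
        set_oob (l.set s (1 - l.getD s 0)) (s+1) (1 - l.getD (s+1) 0) (by simp; omega)]
  · rw [set_oob ((l.set s (1 - l.getD s 0)).set (s+1) (1 - l.getD (s+1) 0)) (s+2)
        (1 - l.getD (s+2) 0) (by simp; omega),
        set_oob (l.set s (1 - l.getD s 0)) (s+1) (1 - l.getD (s+1) 0) (by simp; omega),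
        set_oob l s (1 - l.getD s 0) (by omega)]

lemma change_getD (l : List Int) (s j : Nat) :
    (change l ((s : Int) + 1)).getD j 0 =
      if (j = s ∨ j = s + 1 ∨ j = s + 2) ∧ j < l.length then 1 - l.getD j 0
      else l.getD j 0 := by
  rw [change_eq]
  simp only [getD_set, List.length_set]
  split_ifs with h1 h2 h3 <;> simp_all <;> omega

lemma change_length (l : List Int) (s : Nat) :
    (change l ((s : Int) + 1)).length = l.length := by
  rw [change_eq]; simp

-- A's second loop computes "the whole list matches goal".
lemma okfold (l goal : List Int) (n : Nat) (b : Bool) :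
    (PySem.List.pyRange 0 (n : Int) 1).foldl
      (fun ok i => if PySem.List.pyGetD l i 0 ≠ PySem.List.pyGetD goal i 0 then false else ok) b
    = (b && decide (∀ j, j < n → l.getD j 0 = goal.getD j 0)) := by
  induction n generalizing b with
  | zero => simp [PySem.List.pyRange_one_eq_nil]
  | succ m ih =>
    have hsplit : PySem.List.pyRange 0 ((m + 1 : Nat) : Int) 1
        = PySem.List.pyRange 0 (m : Nat) 1 ++ [((m : Nat) : Int)] := by
      push_cast
      exact PySem.List.pyRange_one_succ_right (by omega)
    rw [hsplit, List.foldl_append, ih]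
    simp only [List.foldl_cons, List.foldl_nil, PySem.List.pyGetD_natCast]
    by_cases h : l.getD m 0 = goal.getD m 0
    · have hiff : (∀ j, j < m + 1 → l.getD j 0 = goal.getD j 0) ↔
          (∀ j, j < m → l.getD j 0 = goal.getD j 0) := by
        constructor
        · intro hh j hj; exact hh j (by omega)
        · intro hh j hj
          rcases Nat.lt_succ_iff_lt_or_eq.mp hj with h' | h'
          · exact hh j h'
          · subst h'; exact h
      simp only [List.getD_eq_getElem?_getD, Nat.lt_succ_iff] at h hiff ⊢
      simp [h, hiff]
    · have hne : ¬ (∀ j, j < m + 1 → l.getD j 0 = goal.getD j 0) := by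
        intro hh; exact h (hh m (by omega))
      simp only [List.getD_eq_getElem?_getD, Nat.lt_succ_iff] at h hne ⊢
      simp [h, hne]

-- Main invariant: from position s, A's remaining loop on the mutated list l and B's
-- remaining loop carrying the parities (p1, p2) of the two pending flips produce the same
-- count, and B's ok equals the final-list comparison A performs afterwards.
lemma loop_inv (a goal : List Int) (len : Nat) :
    ∀ (s : Nat) (l : List Int) (ans : Int) (p1 p2 ok : Bool),
    s + len + 1 = a.length →
    l.length = a.length →
    l.getD s 0 = (if p1 ≠ p2 then 1 - a.getD s 0 else a.getD s 0) →
    (s + 1 < a.length → l.getD (s + 1) 0 = (if p1 = true then 1 - a.getD (s + 1) 0 else a.getD (s + 1) 0)) →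
    (∀ j, s + 2 ≤ j → l.getD j 0 = a.getD j 0) →
    (ok = decide (∀ j, j < s → l.getD j 0 = goal.getD j 0)) →
    (let stA := (PySem.List.pyRange (s : Int) ((a.length : Int) - 1) 1).foldl
        (fun (st : List Int × Int) i =>
          if PySem.List.pyGetD st.1 i 0 ≠ PySem.List.pyGetD goal i 0 then
            (change st.1 (i + 1), st.2 + 1)
          else st) (l, ans)
     let stB := (PySem.List.pyRange (s : Int) (a.length : Int) 1).foldl
        (fun (st : Int × Bool × Bool × Bool) i =>
          let eff := if st.2.2.1 != st.2.2.2 then 1 - PySem.List.pyGetD a i 0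
                     else PySem.List.pyGetD a i 0
          if i = (a.length : Int) - 1 then
            (st.1, st.2.1 && decide (eff = PySem.List.pyGetD goal i 0), false, st.2.2.1)
          else if eff ≠ PySem.List.pyGetD goal i 0 then
            (st.1 + 1, st.2.1 && decide (1 - eff = PySem.List.pyGetD goal i 0), true, st.2.2.1)
          else (st.1, st.2.1, false, st.2.2.1))
        (ans, ok, p1, p2)
     stB.1 = stA.2 ∧ stB.2.1 = decide (∀ j, j < a.length → stA.1.getD j 0 = goal.getD j 0)) := by
  induction len with
  | zero =>
    intro s l ans p1 p2 ok hn hlen h4 h5 h6 hok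
    have hA : PySem.List.pyRange (s : Int) ((a.length : Int) - 1) 1 = [] :=
      PySem.List.pyRange_one_eq_nil (by omega)
    have hB : PySem.List.pyRange (s : Int) (a.length : Int) 1 = [(s : Int)] := by
      have hcast : ((a.length : Nat) : Int) = (s : Int) + 1 := by omega
      rw [hcast]; exact PySem.List.pyRange_one_singleton _
    rw [hA, hB]
    simp only [List.foldl_cons, List.foldl_nil, PySem.List.pyGetD_natCast]
    have hlast : ((s : Int) = (a.length : Int) - 1) := by omega
    rw [if_pos hlast]
    constructor
    · rfl
    · have heff : (if (p1 != p2) = true then 1 - a.getD s 0 else a.getD s 0) = l.getD s 0 := by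
        rw [h4]; by_cases hp : p1 = p2 <;> simp [hp]
      rw [heff, hok, ← Bool.decide_and, decide_eq_decide]
      constructor
      · rintro ⟨hpre, hs⟩ j hj
        rcases Nat.lt_succ_iff_lt_or_eq.mp (by omega : j < s + 1) with h' | h'
        · exact hpre j h'
        · subst h'; exact hs
      · intro hall
        exact ⟨fun j hj => hall j (by omega), hall s (by omega)⟩
  | succ m ih =>
    intro s l ans p1 p2 ok hn hlen h4 h5 h6 hok
    have hs1 : s + 1 < a.length := by omega
    have hA : PySem.List.pyRange (s : Int) ((a.length : Int) - 1) 1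
        = (s : Int) :: PySem.List.pyRange ((s : Int) + 1) ((a.length : Int) - 1) 1 :=
      PySem.List.pyRange_one_cons (by omega)
    have hB : PySem.List.pyRange (s : Int) (a.length : Int) 1
        = (s : Int) :: PySem.List.pyRange ((s : Int) + 1) (a.length : Int) 1 :=
      PySem.List.pyRange_one_cons (by omega)
    have hcast : ((s : Int) + 1) = (((s + 1 : Nat)) : Int) := by push_cast; ring
    rw [hA, hB]
    simp only [List.foldl_cons, PySem.List.pyGetD_natCast]
    have hnotlast : ¬ ((s : Int) = (a.length : Int) - 1) := by omega
    rw [if_neg hnotlast]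
    have heff : (if (p1 != p2) = true then 1 - a.getD s 0 else a.getD s 0) = l.getD s 0 := by
      rw [h4]; by_cases hp : p1 = p2 <;> simp [hp]
    rw [heff]
    by_cases hmatch : l.getD s 0 = goal.getD s 0
    · rw [if_neg (by simpa using hmatch), if_neg (by simpa using hmatch)]
      rw [hcast]
      exact ih (s + 1) l ans false p1 ok (by omega) hlen
        (by rw [h5 hs1]; by_cases hp : p1 <;> simp [hp])
        (fun _ => by rw [h6 (s + 2) (by omega)]; simp)
        (fun j hj => h6 j (by omega))
        (by rw [hok, decide_eq_decide]
            constructor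
            · intro hpre j hj
              rcases Nat.lt_succ_iff_lt_or_eq.mp hj with h' | h'
              · exact hpre j h'
              · subst h'; exact hmatch
            · intro hpre j hj; exact hpre j (by omega))
    · rw [if_pos (by simpa using hmatch), if_pos (by simpa using hmatch)]
      rw [hcast]
      have hlen' : (change l ((s : Int) + 1)).length = a.length := by
        rw [change_length]; exact hlen
      have hg : ∀ j : Nat, (change l ((s : Int) + 1)).getD j 0 =
          if (j = s ∨ j = s + 1 ∨ j = s + 2) ∧ j < a.length then 1 - l.getD j 0
          else l.getD j 0 := by
        intro j; rw [change_getD, hlen]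
      rw [← hcast]
      refine ih (s + 1) (change l ((s : Int) + 1)) (ans + 1) true p1
        (ok && decide (1 - l.getD s 0 = goal.getD s 0)) (by omega) hlen' ?_ ?_ ?_ ?_
      · rw [hg (s + 1), if_pos ⟨by omega, hs1⟩, h5 hs1]
        by_cases hp : p1 <;> simp [hp]
      · intro hs2
        rw [hg (s + 2), if_pos ⟨by omega, hs2⟩, h6 (s + 2) (by omega)]
        simp
      · intro j hj
        rw [hg j, if_neg (by omega), h6 j (by omega)]
      · rw [hok, ← Bool.decide_and, decide_eq_decide]
        constructor
        · rintro ⟨hpre, hs⟩ j hj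
          rcases Nat.lt_succ_iff_lt_or_eq.mp hj with h' | h'
          · rw [hg j, if_neg (by omega)]; exact hpre j h'
          · subst h'
            rw [hg j, if_pos ⟨by omega, by omega⟩]; exact hs
        · intro hall
          constructor
          · intro j hj
            have hj' := hall j (by omega)
            rwa [hg j, if_neg (by omega)] at hj'
          · have hs' := hall s (by omega)
            rwa [hg s, if_pos ⟨by omega, by omega⟩] at hs'

-- ===== VERDICT (by name: the statement is the Claim_ definition above) =====
theorem go_spec : Claim_equal_go := by
  unfold Claim_equal_go Spec_go
  intro a goal _ _
  by_cases hn : a.length = 0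
  · have ha : a = [] := List.eq_nil_of_length_eq_zero hn
    subst ha
    simp [go, go_alt, PySem.List.pyRange_one_eq_nil]
  · have H := loop_inv a goal (a.length - 1) 0 a 0 false false true (by omega) rfl
      (by simp) (fun _ => by simp) (fun j _ => rfl) (by simp)
    simp only [Nat.cast_zero] at H
    obtain ⟨H1, H2⟩ := H
    show go a goal = go_alt a goal
    simp only [go, go_alt]
    rw [okfold, Bool.true_and, ← H2, ← H1]
    cases hb : ((PySem.List.pyRange 0 (a.length : Int) 1).foldl
        (fun (st : Int × Bool × Bool × Bool) i =>
          let eff := if st.2.2.1 != st.2.2.2 then 1 - PySem.List.pyGetD a i 0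
                     else PySem.List.pyGetD a i 0
          if i = (a.length : Int) - 1 then
            (st.1, st.2.1 && decide (eff = PySem.List.pyGetD goal i 0), false, st.2.2.1)
          else if eff ≠ PySem.List.pyGetD goal i 0 then
            (st.1 + 1, st.2.1 && decide (1 - eff = PySem.List.pyGetD goal i 0), true, st.2.2.1)
          else (st.1, st.2.1, false, st.2.2.1))
        (0, true, false, false)).2.1 <;> simp
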